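-- pv_equiv track=rewrite | github.com/ProGenNo/ProHapDatabaseAnalysis | src/common.py | digest
-- ===== SOURCE A (Python) =====
-- def digest(seq, missed_c, min_length, max_length, cleavage_pattern):
--     buffer = ""
--     queue = []          # queue of tryptic peptides of any length
--     position_queue = [] # starting positions of these peptides within given sequence
--
--     peptides = []
--     positions = []
--     missed_cl = []
--
--     prev_cleavage = 0
--
--     for aa_idx in range(len(seq)-1):
--         # check if there's a residue preventing cleavage
--         if (seq[aa_idx+1] in cleavage_pattern['restrictionAfter']) or ((aa_idx > 0) and (seq[aa_idx-1] in cleavage_pattern['restrictionBefore'])):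
--             buffer += seq[aa_idx]
--             continue
--
--         # check whether we shouldn't cleave before adding the current residue
--         if not (seq[aa_idx] in cleavage_pattern['aminoAcidAfter']):
--             buffer += seq[aa_idx]
--
--         if (seq[aa_idx] in cleavage_pattern['aminoAcidBefore']) or (seq[aa_idx] in cleavage_pattern['aminoAcidAfter']):
--             queue.append(buffer)
--             position_queue.append(prev_cleavage)
--
--             if (len(queue) > (missed_c+1)):
--                 queue = queue[-(missed_c+1):]
--                 position_queue = position_queue[-(missed_c+1):]
--
--             if (len(buffer) >= min_length and len(buffer) <= max_length):
--                 peptides.append(buffer)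
--                 positions.append(prev_cleavage)
--                 missed_cl.append(0)
--
--             for no_missed in range(1, missed_c+1):
--                 if (len(queue) > no_missed):
--                     pep_missed = ''.join(queue[-(no_missed+1):])
--                     if (len(pep_missed) >= min_length and len(pep_missed) <= max_length):
--                         peptides.append(pep_missed)
--                         positions.append(position_queue[-(no_missed+1)])
--                         missed_cl.append(no_missed)
--
--             buffer = "" if not (seq[aa_idx] in cleavage_pattern['aminoAcidAfter']) else seq[aa_idx]
--             prev_cleavage = aa_idx+1 if not (seq[aa_idx] in cleavage_pattern['aminoAcidAfter']) else aa_idx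
--
--     # store the remaining peptide on the c-terminal
--     queue.append(buffer)
--     position_queue.append(prev_cleavage)
--
--     if (len(queue) > (missed_c+1)):
--         queue = queue[-(missed_c+1):]
--         position_queue = position_queue[-(missed_c+1):]
--
--     if (len(buffer) >= min_length and len(buffer) <= max_length):
--         peptides.append(buffer)
--         positions.append(prev_cleavage)
--         missed_cl.append(0)
--
--     for no_missed in range(1, missed_c+1):
--         if (len(queue) > no_missed):
--             pep_missed = ''.join(queue[-(no_missed+1):])
--             if (len(pep_missed) >= min_length and len(pep_missed) <= max_length):
--                 peptides.append(pep_missed)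
--                 positions.append(position_queue[-(no_missed+1)])
--                 missed_cl.append(no_missed)
--
--     return peptides, positions, missed_cl
-- ===== SOURCE B (Python) =====
-- def digest(seq, missed_c, min_length, max_length, cleavage_pattern):
--     ra = cleavage_pattern.get('restrictionAfter', [])
--     rb = cleavage_pattern.get('restrictionBefore', [])
--     after = cleavage_pattern.get('aminoAcidAfter', [])
--     before = cleavage_pattern.get('aminoAcidBefore', [])
--
--     # pass 1: cut the sequence into fragments between cleavage sites,
--     # recording each fragment's start position
--     frags = []
--     buf = ""
--     start = 0
--     for i in range(len(seq) - 1):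
--         if seq[i + 1] in ra or (i > 0 and seq[i - 1] in rb):
--             buf += seq[i]
--             continue
--         cleave_after = seq[i] in after
--         if not cleave_after:
--             buf += seq[i]
--         if cleave_after or seq[i] in before:
--             frags.append((buf, start))
--             buf, start = (seq[i], i) if cleave_after else ("", i + 1)
--     frags.append((buf, start))
--
--     # pass 2: for each fragment end index, join the m+1 trailing fragments
--     peptides, positions, missed_cl = [], [], []
--     top = max(missed_c, 0)
--     for i in range(len(frags)):
--         for m in range(top + 1):
--             if m <= i:
--                 pep = ''.join(f for f, _ in frags[i - m:i + 1])
--                 if min_length <= len(pep) <= max_length: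
--                     peptides.append(pep)
--                     positions.append(frags[i - m][1])
--                     missed_cl.append(m)
--     return peptides, positions, missed_cl
-- ===== Notes on version B (the rewrite author's own statement) =====
-- stated objective: alternative
-- what changed: B replaces A's single stateful loop (buffer + sliding peptide queue trimmed in place at every cleavage) by two passes: pass 1 only cuts the sequence into fragments with their start positions, pass 2 emits, for each fragment end index, the peptides with 0..missed_c missed cleavages by joining the trailing fragments.
import Mathlib
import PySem

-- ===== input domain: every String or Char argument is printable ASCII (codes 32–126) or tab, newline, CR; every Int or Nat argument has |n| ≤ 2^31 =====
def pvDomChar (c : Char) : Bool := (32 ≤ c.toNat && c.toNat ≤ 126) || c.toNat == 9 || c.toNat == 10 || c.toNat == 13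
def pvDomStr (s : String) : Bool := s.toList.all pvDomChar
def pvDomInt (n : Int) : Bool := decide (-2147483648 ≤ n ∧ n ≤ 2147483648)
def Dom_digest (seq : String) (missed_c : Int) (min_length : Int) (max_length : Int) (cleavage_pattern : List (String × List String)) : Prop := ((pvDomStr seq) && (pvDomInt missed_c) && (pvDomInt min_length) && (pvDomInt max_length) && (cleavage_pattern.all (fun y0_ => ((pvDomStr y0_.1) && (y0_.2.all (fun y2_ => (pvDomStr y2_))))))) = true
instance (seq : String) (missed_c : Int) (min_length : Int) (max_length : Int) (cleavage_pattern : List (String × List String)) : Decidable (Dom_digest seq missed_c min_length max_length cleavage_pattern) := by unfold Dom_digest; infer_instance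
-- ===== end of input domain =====

-- B re-decomposes A's single stateful loop into two passes (cut into fragments, then join
-- trailing fragments per end index); return values agree on Pre_ (A's KeyError inputs excluded).

-- ===== PORT A =====
-- shared primitive helpers: dict lookup (exact under Pre_: the key is present whenever
-- Python evaluates the subscript) and "1-char string in list of strings" membership
def pvKey (cp : List (String × List String)) (k : String) : List String :=
  (PySem.Dict.mk cp).getD k []

def pvMem (c : Char) (l : List String) : Bool := l.contains (String.ofList [c])

-- the emission block A's Python spells out twice (loop body and c-terminal flush):
-- append buffer to the queue, trim the queue, emit the 0-missed peptide, then the m-loop.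
-- Returns (queue, position_queue, (peptides, positions, missed_cl)).
def pvEmitA (missed_c min_length max_length : Int) (buffer : List Char) (prev : Int)
    (queue : List (List Char)) (posq : List Int)
    (out : List (List Char) × List Int × List Int) :
    List (List Char) × List Int × (List (List Char) × List Int × List Int) :=
  let queue1 := queue ++ [buffer]
  let posq1 := posq ++ [prev]
  let queue2 := if ((queue1.length : Int) > missed_c + 1)
    then PySem.List.slice queue1 (some (-(missed_c + 1))) none else queue1
  let posq2 := if ((queue1.length : Int) > missed_c + 1)
    then PySem.List.slice posq1 (some (-(missed_c + 1))) none else posq1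
  let out1 := if min_length ≤ (buffer.length : Int) ∧ (buffer.length : Int) ≤ max_length
    then (out.1 ++ [buffer], out.2.1 ++ [prev], out.2.2 ++ [(0 : Int)]) else out
  let out2 := (PySem.List.pyRange 1 (missed_c + 1) 1).foldl
    (fun (acc : List (List Char) × List Int × List Int) m =>
      if ((queue2.length : Int) > m) then
        let pep := (PySem.List.slice queue2 (some (-(m + 1))) none).flatten
        if min_length ≤ (pep.length : Int) ∧ (pep.length : Int) ≤ max_length then
          (acc.1 ++ [pep], acc.2.1 ++ [PySem.List.pyGetD posq2 (-(m + 1)) 0], acc.2.2 ++ [m])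
        else acc
      else acc) out1
  (queue2, posq2, out2)

-- the buffer after the (possibly withheld) residue, the fresh buffer and the new
-- prev_cleavage after a cleavage (the three 'aminoAcidAfter' conditionals of the Python)
def pvBuf1 (after : List String) (c : Char) (b : List Char) : List Char :=
  if pvMem c after then b else b ++ [c]
def pvNewBuf (after : List String) (c : Char) : List Char :=
  if pvMem c after then [c] else []
def pvNewPrev (after : List String) (c : Char) (i : Nat) : Int :=
  if pvMem c after then (i : Int) else (i : Int) + 1

-- loop state: (buffer, prev_cleavage, queue, position_queue, (peptides, positions, missed_cl))
def pvStepA (cs : List Char) (ra rb after before : List String)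
    (missed_c min_length max_length : Int)
    (st : List Char × Int × List (List Char) × List Int ×
          (List (List Char) × List Int × List Int)) (i : Nat) :
    List Char × Int × List (List Char) × List Int ×
      (List (List Char) × List Int × List Int) :=
  if pvMem (cs.getD (i + 1) ' ') ra || (decide (0 < i) && pvMem (cs.getD (i - 1) ' ') rb) then
    (st.1 ++ [cs.getD i ' '], st.2)
  else if pvMem (cs.getD i ' ') after || pvMem (cs.getD i ' ') before then
    (pvNewBuf after (cs.getD i ' '), pvNewPrev after (cs.getD i ' ') i,
     (pvEmitA missed_c min_length max_length (pvBuf1 after (cs.getD i ' ') st.1)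
       st.2.1 st.2.2.1 st.2.2.2.1 st.2.2.2.2).1,
     (pvEmitA missed_c min_length max_length (pvBuf1 after (cs.getD i ' ') st.1)
       st.2.1 st.2.2.1 st.2.2.2.1 st.2.2.2.2).2.1,
     (pvEmitA missed_c min_length max_length (pvBuf1 after (cs.getD i ' ') st.1)
       st.2.1 st.2.2.1 st.2.2.2.1 st.2.2.2.2).2.2)
  else
    (pvBuf1 after (cs.getD i ' ') st.1, st.2)

def digest (seq : String) (missed_c : Int) (min_length : Int) (max_length : Int) (cleavage_pattern : List (String × List String)) : List String × List Int × List Int :=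
  let cs := seq.toList
  let ra := pvKey cleavage_pattern "restrictionAfter"
  let rb := pvKey cleavage_pattern "restrictionBefore"
  let after := pvKey cleavage_pattern "aminoAcidAfter"
  let before := pvKey cleavage_pattern "aminoAcidBefore"
  let st := (List.range (cs.length - 1)).foldl
    (pvStepA cs ra rb after before missed_c min_length max_length)
    ([], 0, [], [], ([], [], []))
  let e := pvEmitA missed_c min_length max_length st.1 st.2.1 st.2.2.1 st.2.2.2.1 st.2.2.2.2
  ((e.2.2.1.map fun l => String.ofList l), e.2.2.2.1, e.2.2.2.2)

-- ===== PORT B =====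
-- pass 1 state: (buf, start, frags); frags = fragments cut so far, with start positions
def pvStepB (cs : List Char) (ra rb after before : List String)
    (st : List Char × Int × List (List Char × Int)) (i : Nat) :
    List Char × Int × List (List Char × Int) :=
  if pvMem (cs.getD (i + 1) ' ') ra || (decide (0 < i) && pvMem (cs.getD (i - 1) ' ') rb) then
    (st.1 ++ [cs.getD i ' '], st.2)
  else if pvMem (cs.getD i ' ') after || pvMem (cs.getD i ' ') before then
    (pvNewBuf after (cs.getD i ' '), pvNewPrev after (cs.getD i ' ') i,
     st.2.2 ++ [(pvBuf1 after (cs.getD i ' ') st.1, st.2.1)])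
  else
    (pvBuf1 after (cs.getD i ' ') st.1, st.2.1, st.2.2)

-- pass 2, one end index: peptides with m = 0 .. top missed cleavages ending at fragment i
def pvRow (min_length max_length top : Int) (frags : List (List Char × Int)) (i : Nat)
    (acc : List (List Char) × List Int × List Int) :
    List (List Char) × List Int × List Int :=
  (PySem.List.pyRange 0 (top + 1) 1).foldl
    (fun (acc : List (List Char) × List Int × List Int) m =>
      if m ≤ (i : Int) then
        let pep := ((PySem.List.slice frags (some ((i : Int) - m)) (some ((i : Int) + 1))).map
          Prod.fst).flatten
        if min_length ≤ (pep.length : Int) ∧ (pep.length : Int) ≤ max_length then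
          (acc.1 ++ [pep], acc.2.1 ++ [(PySem.List.pyGetD frags ((i : Int) - m) ([], 0)).2],
           acc.2.2 ++ [m])
        else acc
      else acc) acc

def digest_alt (seq : String) (missed_c : Int) (min_length : Int) (max_length : Int) (cleavage_pattern : List (String × List String)) : List String × List Int × List Int :=
  let cs := seq.toList
  let ra := pvKey cleavage_pattern "restrictionAfter"
  let rb := pvKey cleavage_pattern "restrictionBefore"
  let after := pvKey cleavage_pattern "aminoAcidAfter"
  let before := pvKey cleavage_pattern "aminoAcidBefore"
  let st := (List.range (cs.length - 1)).foldl (pvStepB cs ra rb after before) ([], 0, [])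
  let frags := st.2.2 ++ [(st.1, st.2.1)]
  let top := max missed_c 0
  let out := (List.range frags.length).foldl
    (fun acc i => pvRow min_length max_length top frags i acc) ([], [], [])
  ((out.1.map fun l => String.ofList l), out.2.1, out.2.2)

-- ===== PRECONDITION & SPEC =====
-- Pre_ excludes the inputs on which A's dict subscripts raise KeyError: when the sequence has
-- at least two residues A's loop body runs and subscripts the pattern dict, so the four keys
-- must be present (a slight over-approximation: short-circuiting can skip a key's subscript,
-- so A still returns on some key-missing inputs that Pre_ excludes).
def Pre_digest (seq : String) (missed_c : Int) (min_length : Int) (max_length : Int) (cleavage_pattern : List (String × List String)) : Prop :=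
  seq.toList.length ≤ 1 ∨
    ("restrictionAfter" ∈ cleavage_pattern.map Prod.fst ∧
     "restrictionBefore" ∈ cleavage_pattern.map Prod.fst ∧
     "aminoAcidAfter" ∈ cleavage_pattern.map Prod.fst ∧
     "aminoAcidBefore" ∈ cleavage_pattern.map Prod.fst)
instance (seq : String) (missed_c : Int) (min_length : Int) (max_length : Int) (cleavage_pattern : List (String × List String)) : Decidable (Pre_digest seq missed_c min_length max_length cleavage_pattern) := by unfold Pre_digest; infer_instance

def pvWitness_digest : String × Int × Int × Int × (List (String × List String)) :=
  ("MKRAGRK", 2, 1, 20,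
   [("restrictionAfter", ["P"]), ("restrictionBefore", []),
    ("aminoAcidAfter", []), ("aminoAcidBefore", ["K", "R"])])

def Spec_digest (seq : String) (missed_c : Int) (min_length : Int) (max_length : Int) (cleavage_pattern : List (String × List String)) (out : List String × List Int × List Int) : Prop := out = digest_alt seq missed_c min_length max_length cleavage_pattern
instance (seq : String) (missed_c : Int) (min_length : Int) (max_length : Int) (cleavage_pattern : List (String × List String)) (out : List String × List Int × List Int) : Decidable (Spec_digest seq missed_c min_length max_length cleavage_pattern out) := by unfold Spec_digest; infer_instance

-- ===== CLAIM (what is proved, stated in full; the proofs are below) =====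
def Claim_equal_digest : Prop := ∀ (seq : String) (missed_c : Int) (min_length : Int) (max_length : Int) (cleavage_pattern : List (String × List String)), Dom_digest seq missed_c min_length max_length cleavage_pattern → Pre_digest seq missed_c min_length max_length cleavage_pattern → Spec_digest seq missed_c min_length max_length cleavage_pattern (digest seq missed_c min_length max_length cleavage_pattern)

-- ===== LEMMAS AND PROOFS =====

-- queue / position_queue of A as a function of B's fragment list (valid for 0 ≤ missed_c)
def pvQOf (missed_c : Int) (frags : List (List Char × Int)) : List (List Char) :=
  (frags.map Prod.fst).drop ((frags.map Prod.fst).length - (missed_c + 1).toNat)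
def pvPOf (missed_c : Int) (frags : List (List Char × Int)) : List Int :=
  (frags.map Prod.snd).drop ((frags.map Prod.snd).length - (missed_c + 1).toNat)

-- B's partial pass-2 output over a fragment list
def pvPass2 (min_length max_length top : Int) (frags : List (List Char × Int)) :
    List (List Char) × List Int × List Int :=
  (List.range frags.length).foldl
    (fun acc i => pvRow min_length max_length top frags i acc) ([], [], [])

-- a row with end index < |frags| ignores fragments appended later
lemma pvRow_append (minL maxL top : Int) (frags : List (List Char × Int))
    (f : List Char × Int) (i : Nat) (hi : i < frags.length) (acc) :
    pvRow minL maxL top (frags ++ [f]) i acc = pvRow minL maxL top frags i acc := by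
  unfold pvRow
  apply PySem.List.foldl_congr_mem
  intro a m hm
  rw [PySem.List.mem_pyRange_one] at hm
  by_cases hmi : m ≤ (i : Int)
  · have h0 : (0:Int) ≤ (i:Int) - m := by omega
    have h1 : (0:Int) ≤ (i:Int) + 1 := by omega
    have hslice : PySem.List.slice (frags ++ [f]) (some ((i:Int) - m)) (some ((i:Int)+1))
        = PySem.List.slice frags (some ((i:Int) - m)) (some ((i:Int)+1)) := by
      rw [PySem.List.slice_toNat (frags ++ [f]) h0 h1, PySem.List.slice_toNat frags h0 h1,
        List.drop_append_of_le_length (by omega),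
        List.take_append_of_le_length (by simp only [List.length_drop]; omega)]
    have hget : PySem.List.pyGetD (frags ++ [f]) ((i:Int) - m) (([],0) : List Char × Int)
        = PySem.List.pyGetD frags ((i:Int) - m) ([],0) := by
      rw [PySem.List.pyGetD_eq_getElem (frags ++ [f]) _ h0
            (by simp only [List.length_append, List.length_cons, List.length_nil]; push_cast; omega),
          PySem.List.pyGetD_eq_getElem frags _ h0 (by push_cast; omega)]
      exact List.getElem_append_left (by omega)
    simp only [hmi, if_true, hslice, hget]
  · simp only [hmi, if_false]

-- appending a fragment appends one row to pass 2
lemma pvPass2_append (minL maxL top : Int) (frags : List (List Char × Int))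
    (f : List Char × Int) :
    pvPass2 minL maxL top (frags ++ [f]) =
      pvRow minL maxL top (frags ++ [f]) frags.length (pvPass2 minL maxL top frags) := by
  unfold pvPass2
  have hlen : (frags ++ [f]).length = frags.length + 1 := by simp
  rw [hlen, List.range_succ, List.foldl_append, List.foldl_cons, List.foldl_nil]
  congr 1
  apply PySem.List.foldl_congr_mem
  intro a j hj
  rw [List.mem_range] at hj
  exact pvRow_append minL maxL top frags f j hj a

-- the queue trim step keeps "last (mc+1) elements" through an append (0 ≤ mc)
lemma pvTrim {α : Type} (X : List α) (x : α) (mc : Int) (hmc : 0 ≤ mc)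
    (c : Prop) [Decidable c]
    (hc : c ↔ (((X.drop (X.length - (mc + 1).toNat) ++ [x]).length : Int) > mc + 1)) :
    (if c then
        PySem.List.slice (X.drop (X.length - (mc + 1).toNat) ++ [x]) (some (-(mc + 1))) none
      else X.drop (X.length - (mc + 1).toNat) ++ [x])
      = (X ++ [x]).drop ((X ++ [x]).length - (mc + 1).toNat) := by
  have hneg : -(mc + 1) = -(((mc + 1).toNat : Int)) := by omega
  have happ : X.drop (X.length - (mc + 1).toNat) ++ [x]
      = (X ++ [x]).drop (X.length - (mc + 1).toNat) :=
    (List.drop_append_of_le_length (by omega)).symm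
  split_ifs with h
  · rw [hneg, PySem.List.slice_from_neg_natCast _ _ (by omega), happ, List.drop_drop]
    congr 1
    rw [hc] at h
    simp only [List.length_append, List.length_cons, List.length_nil, List.length_drop] at h ⊢
    omega
  · rw [happ]
    congr 1
    rw [hc] at h
    simp only [List.length_append, List.length_cons, List.length_nil, List.length_drop] at h ⊢
    omega

-- getElem bookkeeping: an element of the mapped-snd list is the pair's second component
lemma pvGetSnd (l : List (List Char × Int)) (i j : Nat)
    (h1 : i < (l.map Prod.snd).length) (h2 : j < l.length) (hij : i = j) :
    (l.map Prod.snd)[i]'h1 = (l[j]'h2).2 := by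
  subst hij; simp

-- THE emission lemma: A's emission block produces exactly B's row for the new fragment,
-- and keeps the queue characterisation (for 0 ≤ missed_c).
lemma pvEmitA_eq_row (mc minL maxL : Int) (frags : List (List Char × Int))
    (b0 : List Char) (p0 : Int) (queue : List (List Char)) (posq : List Int)
    (hq : 0 ≤ mc → queue = pvQOf mc frags ∧ posq = pvPOf mc frags) (acc) :
    (pvEmitA mc minL maxL b0 p0 queue posq acc).2.2 =
        pvRow minL maxL (max mc 0) (frags ++ [(b0, p0)]) frags.length acc ∧
      (0 ≤ mc → (pvEmitA mc minL maxL b0 p0 queue posq acc).1 = pvQOf mc (frags ++ [(b0, p0)]) ∧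
        (pvEmitA mc minL maxL b0 p0 queue posq acc).2.1 = pvPOf mc (frags ++ [(b0, p0)])) := by
  have hi0 : (0 : Int) ≤ (frags.length : Int) := by positivity
  have hslice0 : PySem.List.slice (frags ++ [(b0, p0)]) (some ((frags.length : Int)))
      (some ((frags.length : Int) + 1)) = [(b0, p0)] := by
    rw [PySem.List.slice_toNat _ hi0 (by omega)]
    simp [List.drop_left' (l₁ := frags) rfl]
  have hget0 : PySem.List.pyGetD (frags ++ [(b0, p0)]) ((frags.length : Int))
      (([], 0) : List Char × Int) = (b0, p0) := by
    rw [PySem.List.pyGetD_eq_getElem _ _ hi0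
      (by simp only [List.length_append, List.length_cons, List.length_nil]; push_cast; omega)]
    simp
  by_cases hmc : 0 ≤ mc
  · obtain ⟨hqq, hpp⟩ := hq hmc
    have hq2' : (if (((pvQOf mc frags ++ [b0]).length : Int) > mc + 1)
        then PySem.List.slice (pvQOf mc frags ++ [b0]) (some (-(mc + 1))) none
        else pvQOf mc frags ++ [b0]) = pvQOf mc (frags ++ [(b0, p0)]) := by
      unfold pvQOf
      rw [show (frags ++ [(b0, p0)]).map Prod.fst = frags.map Prod.fst ++ [b0] from by simp]
      exact pvTrim _ b0 mc hmc _ Iff.rfl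
    have hp2' : (if (((pvQOf mc frags ++ [b0]).length : Int) > mc + 1)
        then PySem.List.slice (pvPOf mc frags ++ [p0]) (some (-(mc + 1))) none
        else pvPOf mc frags ++ [p0]) = pvPOf mc (frags ++ [(b0, p0)]) := by
      unfold pvQOf pvPOf
      rw [show (frags ++ [(b0, p0)]).map Prod.snd = frags.map Prod.snd ++ [p0] from by simp]
      refine pvTrim _ p0 mc hmc _ ?_
      simp only [List.length_append, List.length_drop, List.length_map, List.length_cons,
        List.length_nil] <;> omega
    have hEq1 : (pvEmitA mc minL maxL b0 p0 queue posq acc).1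
        = pvQOf mc (frags ++ [(b0, p0)]) := by
      unfold pvEmitA; simp only [hqq, hpp]; exact hq2'
    have hEq2 : (pvEmitA mc minL maxL b0 p0 queue posq acc).2.1
        = pvPOf mc (frags ++ [(b0, p0)]) := by
      unfold pvEmitA; simp only [hqq, hpp]; exact hp2'
    refine ⟨?_, fun _ => ⟨hEq1, hEq2⟩⟩
    unfold pvEmitA
    simp only [hqq, hpp]
    rw [hq2', hp2']
    unfold pvRow
    rw [max_eq_left hmc,
      PySem.List.pyRange_one_cons (show (0:Int) < mc + 1 by omega), List.foldl_cons]
    simp only [zero_add, sub_zero]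
    rw [if_pos hi0]
    simp only [hslice0, hget0, List.map_cons, List.map_nil, List.flatten_cons,
      List.flatten_nil, List.append_nil]
    apply PySem.List.foldl_congr_mem
    intro a m hm
    rw [PySem.List.mem_pyRange_one] at hm
    by_cases hmi : m ≤ (frags.length : Int)
    · rw [if_pos (show (((pvQOf mc (frags ++ [(b0, p0)])).length : Int) > m) by
        unfold pvQOf
        simp only [List.length_drop, List.length_map, List.length_append, List.length_cons,
          List.length_nil]
        omega), if_pos hmi]
      have hpep : (PySem.List.slice (pvQOf mc (frags ++ [(b0, p0)])) (some (-(m + 1))) none).flatten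
          = ((PySem.List.slice (frags ++ [(b0, p0)]) (some ((frags.length : Int) - m))
              (some ((frags.length : Int) + 1))).map Prod.fst).flatten := by
        unfold pvQOf
        rw [show -(m + 1) = -(((m + 1).toNat : Int)) from by omega,
          PySem.List.slice_from_neg_natCast _ _ (by omega), List.drop_drop,
          PySem.List.slice_toNat _ (by omega) (by omega),
          List.take_of_length_le (by
            simp only [List.length_drop, List.length_append, List.length_cons, List.length_nil]
            omega),
          ← List.map_drop]
        congr 2
        congr 1
        simp only [List.length_drop, List.length_map, List.length_append, List.length_cons,
          List.length_nil]
        omega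
      have hpos : PySem.List.pyGetD (pvPOf mc (frags ++ [(b0, p0)])) (-(m + 1)) 0
          = (PySem.List.pyGetD (frags ++ [(b0, p0)]) ((frags.length : Int) - m)
              (([], 0) : List Char × Int)).2 := by
        unfold pvPOf
        rw [show -(m + 1) = -(((m + 1).toNat : Int)) from by omega,
          PySem.List.pyGetD_neg_natCast _ _ _ (by omega) (by
            simp only [List.length_drop, List.length_map, List.length_append, List.length_cons,
              List.length_nil]
            omega),
          PySem.List.pyGetD_eq_getElem _ _ (by omega) (by
            simp only [List.length_append, List.length_cons, List.length_nil]
            push_cast; omega),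
          List.getElem_drop]
        exact pvGetSnd _ _ _ _ _ (by
          simp only [List.length_drop, List.length_map, List.length_append, List.length_cons,
            List.length_nil]
          omega)
      rw [hpep, hpos]
    · rw [if_neg (show ¬ (((pvQOf mc (frags ++ [(b0, p0)])).length : Int) > m) by
        unfold pvQOf
        simp only [List.length_drop, List.length_map, List.length_append, List.length_cons,
          List.length_nil]
        omega), if_neg hmi]
  · refine ⟨?_, fun h => absurd h hmc⟩
    unfold pvEmitA pvRow
    simp only [PySem.List.pyRange_one_eq_nil (show mc + 1 ≤ 1 by omega), List.foldl_nil,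
      max_eq_right (show mc ≤ 0 by omega)]
    rw [PySem.List.pyRange_one_cons (by omega : (0:Int) < 0 + 1), List.foldl_cons,
      PySem.List.pyRange_one_eq_nil (by omega : (0:Int) + 1 ≤ 0 + 1), List.foldl_nil]
    simp only [zero_add, sub_zero]
    rw [if_pos hi0]
    simp only [hslice0, hget0, List.map_cons, List.map_nil, List.flatten_cons,
      List.flatten_nil, List.append_nil]

-- the main loop invariant: A's fold state is determined by B's fold state
lemma pvFold_sync (cs : List Char) (ra rb after before : List String)
    (mc minL maxL : Int) (l : List Nat)
    (buf : List Char) (start : Int) (frags : List (List Char × Int))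
    (queue : List (List Char)) (posq : List Int)
    (hq : 0 ≤ mc → queue = pvQOf mc frags ∧ posq = pvPOf mc frags) :
    (l.foldl (pvStepA cs ra rb after before mc minL maxL)
        (buf, start, queue, posq, pvPass2 minL maxL (max mc 0) frags)).1 =
      (l.foldl (pvStepB cs ra rb after before) (buf, start, frags)).1 ∧
    (l.foldl (pvStepA cs ra rb after before mc minL maxL)
        (buf, start, queue, posq, pvPass2 minL maxL (max mc 0) frags)).2.1 =
      (l.foldl (pvStepB cs ra rb after before) (buf, start, frags)).2.1 ∧
    (l.foldl (pvStepA cs ra rb after before mc minL maxL)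
        (buf, start, queue, posq, pvPass2 minL maxL (max mc 0) frags)).2.2.2.2 =
      pvPass2 minL maxL (max mc 0)
        (l.foldl (pvStepB cs ra rb after before) (buf, start, frags)).2.2 ∧
    (0 ≤ mc →
      (l.foldl (pvStepA cs ra rb after before mc minL maxL)
          (buf, start, queue, posq, pvPass2 minL maxL (max mc 0) frags)).2.2.1 =
        pvQOf mc (l.foldl (pvStepB cs ra rb after before) (buf, start, frags)).2.2 ∧
      (l.foldl (pvStepA cs ra rb after before mc minL maxL)
          (buf, start, queue, posq, pvPass2 minL maxL (max mc 0) frags)).2.2.2.1 =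
        pvPOf mc (l.foldl (pvStepB cs ra rb after before) (buf, start, frags)).2.2) := by
  induction l generalizing buf start frags queue posq with
  | nil =>
    exact ⟨rfl, rfl, rfl, fun h => ⟨(hq h).1, (hq h).2⟩⟩
  | cons i l ih =>
    simp only [List.foldl_cons]
    by_cases h1 : (pvMem (cs.getD (i + 1) ' ') ra
        || (decide (0 < i) && pvMem (cs.getD (i - 1) ' ') rb)) = true
    · have sA : pvStepA cs ra rb after before mc minL maxL
          (buf, start, queue, posq, pvPass2 minL maxL (max mc 0) frags) i
          = (buf ++ [cs.getD i ' '], start, queue, posq,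
             pvPass2 minL maxL (max mc 0) frags) := by
        unfold pvStepA; rw [if_pos h1]
      have sB : pvStepB cs ra rb after before (buf, start, frags) i
          = (buf ++ [cs.getD i ' '], start, frags) := by
        unfold pvStepB; rw [if_pos h1]
      rw [sA, sB]
      exact ih _ _ _ _ _ hq
    · by_cases h2 : (pvMem (cs.getD i ' ') after || pvMem (cs.getD i ' ') before) = true
      · have sA : pvStepA cs ra rb after before mc minL maxL
            (buf, start, queue, posq, pvPass2 minL maxL (max mc 0) frags) i
            = (pvNewBuf after (cs.getD i ' '), pvNewPrev after (cs.getD i ' ') i,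
               (pvEmitA mc minL maxL (pvBuf1 after (cs.getD i ' ') buf)
                 start queue posq (pvPass2 minL maxL (max mc 0) frags)).1,
               (pvEmitA mc minL maxL (pvBuf1 after (cs.getD i ' ') buf)
                 start queue posq (pvPass2 minL maxL (max mc 0) frags)).2.1,
               (pvEmitA mc minL maxL (pvBuf1 after (cs.getD i ' ') buf)
                 start queue posq (pvPass2 minL maxL (max mc 0) frags)).2.2) := by
          unfold pvStepA; rw [if_neg h1, if_pos h2]
        have sB : pvStepB cs ra rb after before (buf, start, frags) i
            = (pvNewBuf after (cs.getD i ' '), pvNewPrev after (cs.getD i ' ') i,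
               frags ++ [(pvBuf1 after (cs.getD i ' ') buf, start)]) := by
          unfold pvStepB; rw [if_neg h1, if_pos h2]
        rw [sA, sB]
        obtain ⟨hrow, hqp⟩ := pvEmitA_eq_row mc minL maxL frags
          (pvBuf1 after (cs.getD i ' ') buf) start
          queue posq hq (pvPass2 minL maxL (max mc 0) frags)
        rw [hrow, ← pvPass2_append]
        exact ih _ _ _ _ _ hqp
      · have sA : pvStepA cs ra rb after before mc minL maxL
            (buf, start, queue, posq, pvPass2 minL maxL (max mc 0) frags) i
            = (pvBuf1 after (cs.getD i ' ') buf, start, queue, posq,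
               pvPass2 minL maxL (max mc 0) frags) := by
          unfold pvStepA; rw [if_neg h1, if_neg h2]
        have sB : pvStepB cs ra rb after before (buf, start, frags) i
            = (pvBuf1 after (cs.getD i ' ') buf, start, frags) := by
          unfold pvStepB; rw [if_neg h1, if_neg h2]
        rw [sA, sB]
        exact ih _ _ _ _ _ hq

-- both programs, from the shared lookups onward, compute the same triple
lemma pvFinal (cs : List Char) (ra rb after before : List String) (mc minL maxL : Int) :
    (((pvEmitA mc minL maxL
        ((List.range (cs.length - 1)).foldl (pvStepA cs ra rb after before mc minL maxL)
          ([], 0, [], [], ([], [], []))).1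
        ((List.range (cs.length - 1)).foldl (pvStepA cs ra rb after before mc minL maxL)
          ([], 0, [], [], ([], [], []))).2.1
        ((List.range (cs.length - 1)).foldl (pvStepA cs ra rb after before mc minL maxL)
          ([], 0, [], [], ([], [], []))).2.2.1
        ((List.range (cs.length - 1)).foldl (pvStepA cs ra rb after before mc minL maxL)
          ([], 0, [], [], ([], [], []))).2.2.2.1
        ((List.range (cs.length - 1)).foldl (pvStepA cs ra rb after before mc minL maxL)
          ([], 0, [], [], ([], [], []))).2.2.2.2).2.2.1.map fun l => String.ofList l),
      (pvEmitA mc minL maxL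
        ((List.range (cs.length - 1)).foldl (pvStepA cs ra rb after before mc minL maxL)
          ([], 0, [], [], ([], [], []))).1
        ((List.range (cs.length - 1)).foldl (pvStepA cs ra rb after before mc minL maxL)
          ([], 0, [], [], ([], [], []))).2.1
        ((List.range (cs.length - 1)).foldl (pvStepA cs ra rb after before mc minL maxL)
          ([], 0, [], [], ([], [], []))).2.2.1
        ((List.range (cs.length - 1)).foldl (pvStepA cs ra rb after before mc minL maxL)
          ([], 0, [], [], ([], [], []))).2.2.2.1
        ((List.range (cs.length - 1)).foldl (pvStepA cs ra rb after before mc minL maxL)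
          ([], 0, [], [], ([], [], []))).2.2.2.2).2.2.2.1,
      (pvEmitA mc minL maxL
        ((List.range (cs.length - 1)).foldl (pvStepA cs ra rb after before mc minL maxL)
          ([], 0, [], [], ([], [], []))).1
        ((List.range (cs.length - 1)).foldl (pvStepA cs ra rb after before mc minL maxL)
          ([], 0, [], [], ([], [], []))).2.1
        ((List.range (cs.length - 1)).foldl (pvStepA cs ra rb after before mc minL maxL)
          ([], 0, [], [], ([], [], []))).2.2.1
        ((List.range (cs.length - 1)).foldl (pvStepA cs ra rb after before mc minL maxL)
          ([], 0, [], [], ([], [], []))).2.2.2.1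
        ((List.range (cs.length - 1)).foldl (pvStepA cs ra rb after before mc minL maxL)
          ([], 0, [], [], ([], [], []))).2.2.2.2).2.2.2.2)
    = ((((List.range ((((List.range (cs.length - 1)).foldl (pvStepB cs ra rb after before)
            ([], 0, [])).2.2 ++ [(((List.range (cs.length - 1)).foldl
              (pvStepB cs ra rb after before) ([], 0, [])).1,
            ((List.range (cs.length - 1)).foldl (pvStepB cs ra rb after before)
              ([], 0, [])).2.1)]).length)).foldl
          (fun acc i => pvRow minL maxL (max mc 0)
            (((List.range (cs.length - 1)).foldl (pvStepB cs ra rb after before)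
              ([], 0, [])).2.2 ++ [(((List.range (cs.length - 1)).foldl
                (pvStepB cs ra rb after before) ([], 0, [])).1,
              ((List.range (cs.length - 1)).foldl (pvStepB cs ra rb after before)
                ([], 0, [])).2.1)]) i acc) ([], [], [])).1.map fun l => String.ofList l),
      ((List.range ((((List.range (cs.length - 1)).foldl (pvStepB cs ra rb after before)
            ([], 0, [])).2.2 ++ [(((List.range (cs.length - 1)).foldl
              (pvStepB cs ra rb after before) ([], 0, [])).1,
            ((List.range (cs.length - 1)).foldl (pvStepB cs ra rb after before)
              ([], 0, [])).2.1)]).length)).foldl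
          (fun acc i => pvRow minL maxL (max mc 0)
            (((List.range (cs.length - 1)).foldl (pvStepB cs ra rb after before)
              ([], 0, [])).2.2 ++ [(((List.range (cs.length - 1)).foldl
                (pvStepB cs ra rb after before) ([], 0, [])).1,
              ((List.range (cs.length - 1)).foldl (pvStepB cs ra rb after before)
                ([], 0, [])).2.1)]) i acc) ([], [], [])).2.1,
      ((List.range ((((List.range (cs.length - 1)).foldl (pvStepB cs ra rb after before)
            ([], 0, [])).2.2 ++ [(((List.range (cs.length - 1)).foldl
              (pvStepB cs ra rb after before) ([], 0, [])).1,
            ((List.range (cs.length - 1)).foldl (pvStepB cs ra rb after before)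
              ([], 0, [])).2.1)]).length)).foldl
          (fun acc i => pvRow minL maxL (max mc 0)
            (((List.range (cs.length - 1)).foldl (pvStepB cs ra rb after before)
              ([], 0, [])).2.2 ++ [(((List.range (cs.length - 1)).foldl
                (pvStepB cs ra rb after before) ([], 0, [])).1,
              ((List.range (cs.length - 1)).foldl (pvStepB cs ra rb after before)
                ([], 0, [])).2.1)]) i acc) ([], [], [])).2.2) := by
  have h0 : pvPass2 minL maxL (max mc 0) ([] : List (List Char × Int)) = ([], [], []) := by
    simp [pvPass2]
  obtain ⟨h1, h2, h3, h4⟩ := pvFold_sync cs ra rb after before mc minL maxL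
    (List.range (cs.length - 1)) [] 0 [] [] [] (fun _ => ⟨by simp [pvQOf], by simp [pvPOf]⟩)
  conv_lhs => rw [← h0]
  rw [h1, h2, h3]
  obtain ⟨hrow, _⟩ := pvEmitA_eq_row mc minL maxL
    ((List.range (cs.length - 1)).foldl (pvStepB cs ra rb after before) ([], 0, [])).2.2
    ((List.range (cs.length - 1)).foldl (pvStepB cs ra rb after before) ([], 0, [])).1
    ((List.range (cs.length - 1)).foldl (pvStepB cs ra rb after before) ([], 0, [])).2.1
    ((List.range (cs.length - 1)).foldl (pvStepA cs ra rb after before mc minL maxL)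
      ([], 0, [], [], pvPass2 minL maxL (max mc 0) ([] : List (List Char × Int)))).2.2.1
    ((List.range (cs.length - 1)).foldl (pvStepA cs ra rb after before mc minL maxL)
      ([], 0, [], [], pvPass2 minL maxL (max mc 0) ([] : List (List Char × Int)))).2.2.2.1
    h4
    (pvPass2 minL maxL (max mc 0)
      ((List.range (cs.length - 1)).foldl (pvStepB cs ra rb after before) ([], 0, [])).2.2)
  rw [hrow, ← pvPass2_append]
  rfl

-- ===== VERDICT (by name: the statement is the Claim_ definition above) =====
theorem digest_spec : Claim_equal_digest := by
  unfold Claim_equal_digest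
  intro seq mc minL maxL cp _ _
  unfold Spec_digest digest digest_alt
  exact pvFinal seq.toList (pvKey cp "restrictionAfter") (pvKey cp "restrictionBefore")
    (pvKey cp "aminoAcidAfter") (pvKey cp "aminoAcidBefore") mc minL maxL
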